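-- pv_equiv track=rewrite | github.com/dillonwu-97/csec-code | dreamhack/rev/easy-reversing/solve.py | p_add
-- ===== SOURCE A (Python) =====
-- def p_add(a, b):
--     added_val = 0
--     ctr = 0
--     while (a):
--         temp = ((b & 0xff) + (a & 0xff)) % 256 << (ctr * 8)
--         added_val += temp
--         b = b >> 0x8
--         a = a >> 0x8
--         ctr += 1
--     return added_val
-- ===== SOURCE B (Python) =====
-- def p_add(a, b):
--     n = (a.bit_length() + 7) // 8
--     a_bytes = a.to_bytes(n, 'little')
--     b_bytes = (b & ((1 << (8 * n)) - 1)).to_bytes(n, 'little')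
--     out = bytes((x + y) % 256 for x, y in zip(a_bytes, b_bytes))
--     return int.from_bytes(out, 'little')
-- ===== Notes on version B (the rewrite author's own statement) =====
-- stated objective: idiomatic
-- what changed: Replaces A's shift-and-accumulate while loop (masking and right-shifting both ints, rebuilding the result with << ctr*8) by the byte-array view: to_bytes both numbers little-endian, add position-wise mod 256, int.from_bytes the result.
import Mathlib
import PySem

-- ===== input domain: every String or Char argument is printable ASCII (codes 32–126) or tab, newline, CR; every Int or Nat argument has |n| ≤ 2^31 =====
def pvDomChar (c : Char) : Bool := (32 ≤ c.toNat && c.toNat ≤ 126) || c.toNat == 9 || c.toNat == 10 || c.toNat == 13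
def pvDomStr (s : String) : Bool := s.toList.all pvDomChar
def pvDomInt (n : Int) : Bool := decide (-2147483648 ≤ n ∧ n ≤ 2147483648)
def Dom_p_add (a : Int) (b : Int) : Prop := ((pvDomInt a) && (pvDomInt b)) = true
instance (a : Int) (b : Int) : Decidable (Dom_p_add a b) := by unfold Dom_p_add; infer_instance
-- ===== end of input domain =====

-- B replaces A's shift-and-accumulate while loop by a byte-array view: split both
-- numbers into little-endian byte lists, add position-wise mod 256, reassemble (idiomatic).

-- ===== PORT A =====
-- while (a): loop of A.  Python `x & 0xff` = `x % 256` (Lean emod, divisor 256 > 0)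
-- and `x >> 8` = floor division `x / 256` (Lean ediv = floor for positive divisor) — exact.
-- For a < 0 the Python loop never terminates; the port returns the accumulator there,
-- and Pre_p_add excludes those inputs.
def pAddLoop (addedVal : Int) (ctr : Nat) (a b : Int) : Int :=
  if 0 < a then
    pAddLoop (addedVal + ((b % 256 + a % 256) % 256) * 2 ^ (ctr * 8)) (ctr + 1) (a / 256) (b / 256)
  else addedVal
termination_by a.toNat
decreasing_by omega

def p_add (a : Int) (b : Int) : Int := pAddLoop 0 0 a b

-- ===== PORT B =====
-- int.to_bytes(n, 'little') for a value known to fit in n bytes: n little-endian bytes.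
def toBytesLE (x : Int) : Nat → List Int
  | 0 => []
  | n + 1 => (x % 256) :: toBytesLE (x / 256) n

-- int.from_bytes(_, 'little')
def fromBytesLE (ds : List Int) : Int := ds.foldr (fun d acc => d + 256 * acc) 0

-- a.bit_length() for a ≥ 0 is Nat.size
def p_add_alt (a : Int) (b : Int) : Int :=
  let n := (Nat.size a.toNat + 7) / 8
  let aBytes := toBytesLE a n
  let bBytes := toBytesLE (b % 2 ^ (8 * n)) n     -- b & ((1 << 8n) - 1), then to_bytes
  fromBytesLE (List.zipWith (fun x y => (x + y) % 256) aBytes bBytes)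

-- ===== PRECONDITION & SPEC =====
-- Pre_ excludes a < 0: there A's `while (a)` never terminates (a >> 8 stabilises at -1),
-- so A returns no value (and B raises OverflowError in to_bytes).
def Pre_p_add (a : Int) (b : Int) : Prop := 0 ≤ a
instance (a : Int) (b : Int) : Decidable (Pre_p_add a b) := by unfold Pre_p_add; infer_instance
def pvWitness_p_add : Int × Int := (73906, -513)

def Spec_p_add (a : Int) (b : Int) (out : Int) : Prop := out = p_add_alt a b
instance (a : Int) (b : Int) (out : Int) : Decidable (Spec_p_add a b out) := by unfold Spec_p_add; infer_instance

-- ===== CLAIM (what is proved, stated in full; the proofs are below) =====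
def Claim_equal_p_add : Prop := ∀ (a : Int) (b : Int), Dom_p_add a b → Pre_p_add a b → Spec_p_add a b (p_add a b)

-- ===== LEMMAS AND PROOFS =====

/-- Byte length of `t / 256` is one less (in the `(size+7)/8` sense, via size). -/
lemma size_div256 (t : Nat) : Nat.size (t / 256) = Nat.size t - 8 := by
  rcases Nat.lt_or_ge (Nat.size t) 9 with h | h
  · have ht : t < 256 := by
      have := Nat.size_le.mp (le_refl (Nat.size t))
      calc t < 2 ^ Nat.size t := this
        _ ≤ 2 ^ 8 := Nat.pow_le_pow_right (by norm_num) (by omega)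
    simp [Nat.div_eq_of_lt ht, Nat.size_zero]
    omega
  · apply le_antisymm
    · rw [Nat.size_le]
      have ht : t < 2 ^ Nat.size t := Nat.lt_size_self t
      rw [Nat.div_lt_iff_lt_mul (by norm_num : 0 < 256)]
      calc t < 2 ^ Nat.size t := ht
        _ = 2 ^ (Nat.size t - 8) * 256 := by
            rw [show (256 : ℕ) = 2 ^ 8 by norm_num, ← pow_add]
            congr 1; omega
    · have h9 : 9 ≤ Nat.size t := h
      have h2 : 2 ^ (Nat.size t - 1) ≤ t := by
        have := Nat.lt_size.mp (show Nat.size t - 1 < Nat.size t by omega)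
        exact this
      have : Nat.size t - 9 < Nat.size (t / 256) := by
        rw [Nat.lt_size, Nat.le_div_iff_mul_le (by norm_num : 0 < 256)]
        calc 2 ^ (Nat.size t - 9) * 256 = 2 ^ (Nat.size t - 1) := by
              rw [show (256 : ℕ) = 2 ^ 8 by norm_num, ← pow_add]
              congr 1; omega
          _ ≤ t := h2
      omega

/-- Masking `b` to `n` bytes does not change its first `n` little-endian bytes. -/
lemma toBytesLE_mask (n : Nat) : ∀ b : Int, toBytesLE (b % 2 ^ (8 * n)) n = toBytesLE b n := by
  induction n with
  | zero => intro b; rfl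
  | succ m ih =>
    intro b
    have hdvd : (256 : Int) ∣ 2 ^ (8 * (m + 1)) := by
      rw [show (256 : Int) = 2 ^ 8 by norm_num]
      exact pow_dvd_pow 2 (by omega)
    have hhead : b % 2 ^ (8 * (m + 1)) % 256 = b % 256 := Int.emod_emod_of_dvd b hdvd
    have htail : b % 2 ^ (8 * (m + 1)) / 256 = b / 256 % 2 ^ (8 * m) := by
      have hk : (2 : Int) ^ (8 * (m + 1)) = 256 * 2 ^ (8 * m) := by
        rw [show (256 : Int) = 2 ^ 8 by norm_num, ← pow_add]
        congr 1; omega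
      rw [hk]
      have hemod : b % (256 * 2 ^ (8 * m)) = b + (-(2 ^ (8 * m) * (b / (256 * 2 ^ (8 * m))))) * 256 := by
        rw [Int.emod_def]; ring
      rw [hemod, Int.add_mul_ediv_right _ _ (by norm_num : (256 : Int) ≠ 0)]
      rw [Int.emod_def, ← Int.ediv_ediv_of_nonneg (by norm_num : (0:Int) ≤ 256)]
      ring
    show (b % 2 ^ (8 * (m + 1))) % 256 :: toBytesLE (b % 2 ^ (8 * (m + 1)) / 256) m
        = b % 256 :: toBytesLE (b / 256) m
    rw [hhead, htail, ih (b / 256)]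

lemma p_add_alt_zero (b : Int) : p_add_alt 0 b = 0 := by
  simp [p_add_alt, Nat.size_zero, toBytesLE, fromBytesLE]

/-- Recurrence of B along A's loop step. -/
lemma p_add_alt_rec (a b : Int) (ha : 0 < a) :
    p_add_alt a b = (a % 256 + b % 256) % 256 + 256 * p_add_alt (a / 256) (b / 256) := by
  have hsz : 0 < Nat.size a.toNat := Nat.size_pos.mpr (by omega)
  have hdivnat : (a / 256).toNat = a.toNat / 256 := by omega
  set s := Nat.size a.toNat with hs
  have hsz' : Nat.size (a / 256).toNat = s - 8 := by
    rw [hdivnat, size_div256]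
  have hn : (s + 7) / 8 = (Nat.size (a / 256).toNat + 7) / 8 + 1 := by
    rw [hsz']; omega
  simp only [p_add_alt]
  rw [hn]
  set m := (Nat.size (a / 256).toNat + 7) / 8 with hm
  rw [toBytesLE_mask (m + 1) b, toBytesLE_mask m (b / 256)]
  show fromBytesLE (List.zipWith _ (a % 256 :: toBytesLE (a / 256) m) (b % 256 :: toBytesLE (b / 256) m)) = _
  simp only [List.zipWith_cons_cons, fromBytesLE, List.foldr_cons]

lemma pAddLoop_spec : ∀ (N : Nat) (a b acc : Int) (ctr : Nat), a.toNat ≤ N → 0 ≤ a →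
    pAddLoop acc ctr a b = acc + 2 ^ (ctr * 8) * p_add_alt a b := by
  intro N
  induction N with
  | zero =>
    intro a b acc ctr hN ha
    have ha0 : a = 0 := by omega
    subst ha0
    rw [pAddLoop]
    simp [p_add_alt_zero]
  | succ N ih =>
    intro a b acc ctr hN ha
    rcases eq_or_lt_of_le ha with h0 | h0
    · subst h0
      rw [pAddLoop]
      simp [p_add_alt_zero]
    · rw [pAddLoop, if_pos h0]
      have hrec := ih (a / 256) (b / 256)
        (acc + (b % 256 + a % 256) % 256 * 2 ^ (ctr * 8)) (ctr + 1) (by omega) (by omega)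
      rw [hrec, p_add_alt_rec a b h0]
      have hp : (2 : Int) ^ ((ctr + 1) * 8) = 2 ^ (ctr * 8) * 256 := by
        rw [show (ctr + 1) * 8 = ctr * 8 + 8 by ring, pow_add]
        norm_num
      rw [hp]
      ring

-- ===== VERDICT (by name: the statement is the Claim_ definition above) =====
theorem p_add_spec : Claim_equal_p_add := by
  intro a b _ hpre
  show p_add a b = p_add_alt a b
  unfold p_add
  rw [pAddLoop_spec a.toNat a b 0 0 le_rfl hpre]
  simp
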